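-- pv_equiv track=rewrite | github.com/denovochem/cholla_chem | cholla_chem/name_manipulation/name_correction/build_flashtext_ocr_map.py | generate_deletion_errors
-- ===== SOURCE A (Python) =====
-- from collections import deque
-- from typing import Dict, List, Set
--
-- def generate_deletion_errors(word: str, max_edits: int = 1) -> Set[str]:
--     """
--     Generate all possible deletion error variants of a word.
--
--     Args:
--         word: The word to generate deletion errors for
--         max_edits: Maximum number of deletions to generate
--
--     Returns:
--         Set of all possible deletion error variants
--     """
--     results: Set[str] = set()
--     queue = deque([(word, 0)])
--     visited = {word}
--
--     while queue:
--         current_s, depth = queue.popleft()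
--         if depth >= max_edits:
--             continue
--
--         for i in range(len(current_s)):
--             new_candidate = current_s[:i] + current_s[i + 1 :]
--             if new_candidate not in visited:
--                 visited.add(new_candidate)
--                 results.add(new_candidate)
--                 queue.append((new_candidate, depth + 1))
--
--     return results
-- ===== SOURCE B (Python) =====
-- def generate_deletion_errors(word: str, max_edits: int = 1):
--     """Generate all deletion error variants of word with 1..max_edits deletions."""
--     def delk(s, k):
--         # all results of deleting exactly k characters from s (choose kept positions)
--         if k == 0:
--             return [s]
--         if not s:
--             return []
--         rest = s[1:]
--         return delk(rest, k - 1) + [s[0] + t for t in delk(rest, k)]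
--
--     results = set()
--     for k in range(1, min(max_edits, len(word)) + 1):
--         results.update(delk(word, k))
--     return results
-- ===== Notes on version B (the rewrite author's own statement) =====
-- stated objective: simpler
-- what changed: Replaces the BFS (deque + depth counters + visited set) by direct enumeration: a structural recursion delk(s,k) lists all results of deleting exactly k characters, and the result set accumulates delk(word,k) for k = 1..min(max_edits, len(word)).
import Mathlib
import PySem

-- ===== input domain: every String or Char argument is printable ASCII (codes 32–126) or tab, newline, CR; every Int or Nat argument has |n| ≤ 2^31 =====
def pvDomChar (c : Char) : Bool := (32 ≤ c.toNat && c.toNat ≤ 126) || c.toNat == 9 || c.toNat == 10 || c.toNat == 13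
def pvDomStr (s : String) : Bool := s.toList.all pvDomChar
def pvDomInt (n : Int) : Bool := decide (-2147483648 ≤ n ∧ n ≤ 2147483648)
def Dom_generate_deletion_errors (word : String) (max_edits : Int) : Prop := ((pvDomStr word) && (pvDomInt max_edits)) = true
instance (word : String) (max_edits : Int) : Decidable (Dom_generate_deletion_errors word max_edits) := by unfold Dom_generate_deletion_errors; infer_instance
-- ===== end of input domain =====

-- B changes the algorithm: direct enumeration of exactly-k deletions by structural
-- recursion for k = 1..min(max_edits, len(word)), instead of A's BFS with a queue,
-- depth counters and a visited set.  Both ports build the Python set (a PySem.Set,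
-- i.e. the distinct results in insertion order) over List Char and convert to
-- String once at the end (String.ofList is injective, so this represents str exactly).

-- ===== PORT A =====

-- current_s[:i] + current_s[i+1:]
def delCandidate (s : List Char) (i : Int) : List Char :=
  PySem.List.slice s none (some i) ++ PySem.List.slice s (some (i + 1)) none

-- the body of A's inner `for i in range(len(current_s))` loop; state = (queue, visited, results)
def stepA (d : Int) (s : List Char)
    (st : List (List Char × Int) × PySem.Set (List Char) × PySem.Set (List Char)) (i : Int) :
    List (List Char × Int) × PySem.Set (List Char) × PySem.Set (List Char) :=
  let cand := delCandidate s i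
  if PySem.Set.contains st.2.1 cand then st
  else (st.1 ++ [(cand, d + 1)], st.2.1.add cand, st.2.2.add cand)

-- emitted-but-not-yet-seen elements of a list, relative to a seen-set (used to
-- characterise the fold of stepA; needed by the termination measure of bfsA)
def newOf {α : Type} [BEq α] (vis : PySem.Set α) : List α → List α
  | [] => []
  | x :: xs => if PySem.Set.contains vis x then newOf vis xs else x :: newOf (vis.add x) xs

theorem length_newOf_le {α : Type} [BEq α] (xs : List α) : ∀ (vis : PySem.Set α),
    (newOf vis xs).length ≤ xs.length := by
  induction xs with
  | nil => intro vis; simp [newOf]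
  | cons x xs ih =>
    intro vis
    simp only [newOf]
    split
    · exact Nat.le_succ_of_le (ih vis)
    · simpa using ih (vis.add x)

theorem mem_of_mem_newOf {α : Type} [BEq α] {y : α} (xs : List α) : ∀ (vis : PySem.Set α),
    y ∈ newOf vis xs → y ∈ xs := by
  induction xs with
  | nil => intro vis h; simp [newOf] at h
  | cons x xs ih =>
    intro vis h
    simp only [newOf] at h
    by_cases hc : PySem.Set.contains vis x = true
    · rw [if_pos hc] at h
      exact List.mem_cons_of_mem _ (ih vis h)
    · rw [if_neg hc, List.mem_cons] at h
      rcases h with h1 | h1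
      · simp [h1]
      · exact List.mem_cons_of_mem _ (ih _ h1)

theorem update_cons {α : Type} [BEq α] (vis : PySem.Set α) (x : α) (xs : List α) :
    PySem.Set.update vis (x :: xs) = PySem.Set.update (vis.add x) xs := rfl

theorem foldl_stepA (d : Int) (s : List Char) (idxs : List Int) :
    ∀ (q : List (List Char × Int)) (vis res : PySem.Set (List Char)),
    idxs.foldl (stepA d s) (q, vis, res)
      = (q ++ (newOf vis (idxs.map (delCandidate s))).map (fun c => (c, d + 1)),
         vis.update (idxs.map (delCandidate s)),
         res.update (newOf vis (idxs.map (delCandidate s)))) := by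
  induction idxs with
  | nil => intro q vis res; simp [newOf, PySem.Set.update]
  | cons i idxs ih =>
    intro q vis res
    rw [List.foldl_cons, List.map_cons]
    by_cases h : PySem.Set.contains vis (delCandidate s i) = true
    · have hadd : vis.add (delCandidate s i) = vis := by
        unfold PySem.Set.add; rw [if_pos h]
      have hstep : stepA d s (q, vis, res) i = (q, vis, res) := by
        unfold stepA; rw [if_pos h]
      have hnew : newOf vis (delCandidate s i :: idxs.map (delCandidate s))
          = newOf vis (idxs.map (delCandidate s)) := by
        simp only [newOf]; rw [if_pos h]
      rw [hstep, ih q vis res, hnew, update_cons, hadd]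
    · have hstep : stepA d s (q, vis, res) i
          = (q ++ [(delCandidate s i, d + 1)], vis.add (delCandidate s i),
             res.add (delCandidate s i)) := by
        unfold stepA; rw [if_neg h]
      have hnew : newOf vis (delCandidate s i :: idxs.map (delCandidate s))
          = delCandidate s i :: newOf (vis.add (delCandidate s i)) (idxs.map (delCandidate s)) := by
        simp only [newOf]; rw [if_neg h]
      rw [hstep, ih, hnew, update_cons]
      have hres : PySem.Set.update res (delCandidate s i
            :: newOf (vis.add (delCandidate s i)) (idxs.map (delCandidate s)))
          = PySem.Set.update (res.add (delCandidate s i))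
              (newOf (vis.add (delCandidate s i)) (idxs.map (delCandidate s))) := rfl
      rw [hres]
      simp

-- the weight of a queue entry, for termination of the BFS
def qWeight (p : List Char × Int) : Nat := (p.1.length + 1).factorial

theorem delCandidate_length {s : List Char} {i : Int}
    (h : i ∈ PySem.List.pyRange 0 (s.length : Int) 1) :
    (delCandidate s i).length + 1 = s.length := by
  rw [PySem.List.mem_pyRange_one] at h
  obtain ⟨h0, h1⟩ := h
  obtain ⟨j, rfl⟩ : ∃ j : Nat, i = (j : Int) := ⟨i.toNat, (Int.toNat_of_nonneg h0).symm⟩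
  have hj : j < s.length := by exact_mod_cast h1
  have : ((j : Int) + 1) = ((j + 1 : Nat) : Int) := by push_cast; ring
  rw [delCandidate, this, PySem.List.slice_to_natCast, PySem.List.slice_from_natCast]
  simp [List.length_take, List.length_drop]
  omega

theorem sum_qWeight_children {s : List Char} {d : Int} {ch : List (List Char)}
    (hmem : ∀ c ∈ ch, c ∈ (PySem.List.pyRange 0 (s.length : Int) 1).map (delCandidate s))
    (hlen : ch.length ≤ s.length) :
    ((ch.map (fun c => (c, d + 1))).map qWeight).sum < (s.length + 1).factorial := by
  have hw : ∀ w ∈ (ch.map (fun c => (c, d + 1))).map qWeight, w ≤ s.length.factorial := by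
    intro w hwm
    simp only [List.map_map, List.mem_map, Function.comp] at hwm
    obtain ⟨c, hc, rfl⟩ := hwm
    obtain ⟨i, hi, rfl⟩ := List.mem_map.1 (hmem c hc)
    have := delCandidate_length hi
    simp [qWeight, this]
  calc ((ch.map (fun c => (c, d + 1))).map qWeight).sum
      ≤ ((ch.map (fun c => (c, d + 1))).map qWeight).length * s.length.factorial :=
        List.sum_le_card_nsmul _ _ hw
    _ ≤ s.length * s.length.factorial := by
        simp only [List.length_map]
        exact Nat.mul_le_mul_right _ hlen
    _ < (s.length + 1).factorial := by
        rw [Nat.factorial_succ]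
        have := Nat.factorial_pos s.length
        nlinarith

-- the BFS while-loop of A: pop from the front, append new candidates at the back
def bfsA (max_edits : Int) :
    List (List Char × Int) → PySem.Set (List Char) → PySem.Set (List Char) →
    PySem.Set (List Char)
  | [], _, res => res
  | (s, d) :: q, vis, res =>
    if d ≥ max_edits then bfsA max_edits q vis res
    else
      let st := (PySem.List.pyRange 0 (s.length : Int) 1).foldl (stepA d s) (q, vis, res)
      bfsA max_edits st.1 st.2.1 st.2.2
  termination_by queue _ _ => (queue.map qWeight).sum
  decreasing_by
  · simp [qWeight]
    positivity
  · rw [foldl_stepA]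
    simp only [List.map_append, List.sum_append, List.map_cons, List.sum_cons]
    have h1 : (((newOf vis ((PySem.List.pyRange 0 (s.length : Int) 1).map (delCandidate s))).map
        (fun c => (c, d + 1))).map qWeight).sum < (s.length + 1).factorial := by
      apply sum_qWeight_children
      · intro c hc; exact mem_of_mem_newOf _ _ hc
      · calc (newOf vis ((PySem.List.pyRange 0 (s.length : Int) 1).map (delCandidate s))).length
            ≤ ((PySem.List.pyRange 0 (s.length : Int) 1).map (delCandidate s)).length :=
              length_newOf_le _ _
          _ ≤ s.length := by
              rw [List.length_map]
              simp [PySem.List.pyRange]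
              split <;> omega
    simp only [qWeight]
    omega

def generate_deletion_errors (word : String) (max_edits : Int) : List String :=
  (bfsA max_edits [(word.toList, 0)] (PySem.Set.ofList [word.toList]) PySem.Set.empty).map
    String.ofList

-- ===== PORT B =====

-- delk(s, k): all results of deleting exactly k characters from s
def delkB : List Char → Nat → List (List Char)
  | s, 0 => [s]
  | [], _ + 1 => []
  | c :: t, k + 1 => delkB t k ++ (delkB t (k + 1)).map (fun u => c :: u)

def generate_deletion_errors_alt (word : String) (max_edits : Int) : List String :=
  ((PySem.List.pyRange 1 (min max_edits (word.toList.length : Int) + 1) 1).foldl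
      (fun res k => PySem.Set.update res (delkB word.toList k.toNat))
      PySem.Set.empty).map String.ofList

-- ===== PRECONDITION & SPEC =====
def Spec_generate_deletion_errors (word : String) (max_edits : Int) (out : List String) : Prop := out = generate_deletion_errors_alt word max_edits
instance (word : String) (max_edits : Int) (out : List String) : Decidable (Spec_generate_deletion_errors word max_edits out) := by unfold Spec_generate_deletion_errors; infer_instance

-- ===== CLAIM (what is proved, stated in full; the proofs are below) =====
def Claim_equal_generate_deletion_errors : Prop := ∀ (word : String) (max_edits : Int), Dom_generate_deletion_errors word max_edits → Spec_generate_deletion_errors word max_edits (generate_deletion_errors word max_edits)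

-- ===== LEMMAS AND PROOFS =====

theorem contains_iff {α : Type} [BEq α] [LawfulBEq α] (s : PySem.Set α) (x : α) :
    PySem.Set.contains s x = true ↔ x ∈ s := by
  simp [PySem.Set.contains]

theorem update_eq_append_newOf {α : Type} [BEq α] (xs : List α) :
    ∀ (vis : PySem.Set α), PySem.Set.update vis xs = vis ++ newOf vis xs := by
  induction xs with
  | nil => intro vis; simp [newOf, PySem.Set.update]
  | cons x xs ih =>
    intro vis
    rw [update_cons, ih]
    by_cases h : PySem.Set.contains vis x = true
    · have hadd : vis.add x = vis := by unfold PySem.Set.add; rw [if_pos h]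
      rw [hadd]
      simp only [newOf]; rw [if_pos h]
    · have hadd : vis.add x = vis ++ [x] := by unfold PySem.Set.add; rw [if_neg h]
      rw [hadd]
      have hnew : newOf vis (x :: xs) = x :: newOf (vis.add x) xs := by
        simp only [newOf]; rw [if_neg h]
      rw [hnew, hadd]
      simp

theorem dedup_eq_newOf_nil {α : Type} [BEq α] (xs : List α) :
    PySem.List.dedup xs = newOf ([] : PySem.Set α) xs := by
  rw [PySem.List.dedup_eq_ofList]
  have h1 : PySem.Set.ofList xs = PySem.Set.update ([] : PySem.Set α) xs := rfl
  rw [h1, update_eq_append_newOf]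
  simp

theorem newOf_append {α : Type} [BEq α] (xs ys : List α) : ∀ (vis : PySem.Set α),
    newOf vis (xs ++ ys) = newOf vis xs ++ newOf (vis ++ newOf vis xs) ys := by
  induction xs with
  | nil => intro vis; simp [newOf]
  | cons x xs ih =>
    intro vis
    rw [List.cons_append]
    by_cases h : PySem.Set.contains vis x = true
    · have hadd : vis.add x = vis := by unfold PySem.Set.add; rw [if_pos h]
      have h1 : newOf vis (x :: (xs ++ ys)) = newOf vis (xs ++ ys) := by
        simp only [newOf]; rw [if_pos h]
      have h2 : newOf vis (x :: xs) = newOf vis xs := by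
        simp only [newOf]; rw [if_pos h]
      rw [h1, h2, ih]
    · have hadd : vis.add x = vis ++ [x] := by unfold PySem.Set.add; rw [if_neg h]
      have h1 : newOf vis (x :: (xs ++ ys)) = x :: newOf (vis.add x) (xs ++ ys) := by
        simp only [newOf]; rw [if_neg h]
      have h2 : newOf vis (x :: xs) = x :: newOf (vis.add x) xs := by
        simp only [newOf]; rw [if_neg h]
      rw [h1, h2, ih, hadd]
      simp

theorem mem_newOf {α : Type} [BEq α] [LawfulBEq α] {y : α} (xs : List α) :
    ∀ (vis : PySem.Set α), y ∈ newOf vis xs ↔ y ∈ xs ∧ y ∉ vis := by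
  induction xs with
  | nil => intro vis; simp [newOf]
  | cons x xs ih =>
    intro vis
    by_cases h : PySem.Set.contains vis x = true
    · have hx : x ∈ vis := (contains_iff vis x).1 h
      have h1 : newOf vis (x :: xs) = newOf vis xs := by
        simp only [newOf]; rw [if_pos h]
      rw [h1, ih]
      constructor
      · rintro ⟨hm, hv⟩; exact ⟨List.mem_cons_of_mem _ hm, hv⟩
      · rintro ⟨hm, hv⟩
        rcases List.mem_cons.1 hm with rfl | hm
        · exact absurd hx hv
        · exact ⟨hm, hv⟩
    · have hx : x ∉ vis := fun hm => h ((contains_iff vis x).2 hm)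
      have h1 : newOf vis (x :: xs) = x :: newOf (vis.add x) xs := by
        simp only [newOf]; rw [if_neg h]
      rw [h1]
      constructor
      · intro hm
        rcases List.mem_cons.1 hm with rfl | hm
        · exact ⟨List.mem_cons_self, hx⟩
        · obtain ⟨h2, h3⟩ := (ih _).1 hm
          refine ⟨List.mem_cons_of_mem _ h2, fun hv => h3 ?_⟩
          rw [PySem.Set.mem_add]
          exact Or.inl hv
      · rintro ⟨hm, hv⟩
        rcases List.mem_cons.1 hm with rfl | hm
        · exact List.mem_cons_self
        · by_cases hyx : y = x
          · subst hyx; exact List.mem_cons_self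
          · refine List.mem_cons_of_mem _ ((ih _).2 ⟨hm, fun hadd => ?_⟩)
            rcases (PySem.Set.mem_add vis x y).1 hadd with h2 | h2
            · exact hv h2
            · exact hyx h2

theorem newOf_filter {α : Type} [BEq α] [LawfulBEq α] (xs : List α) :
    ∀ (vis : PySem.Set α),
    newOf vis xs = (newOf ([] : PySem.Set α) xs).filter (fun a => !PySem.Set.contains vis a) := by
  induction xs with
  | nil => intro vis; simp [newOf]
  | cons x xs ih =>
    intro vis
    have hnil : newOf ([] : PySem.Set α) (x :: xs) = x :: newOf (PySem.Set.add ([] : PySem.Set α) x) xs := by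
      simp only [newOf]
      rw [if_neg (by simp [PySem.Set.contains])]
    have hone : newOf (PySem.Set.add ([] : PySem.Set α) x) xs
        = (newOf ([] : PySem.Set α) xs).filter (fun a => !PySem.Set.contains ([x] : PySem.Set α) a) := by
      have : (PySem.Set.add ([] : PySem.Set α) x) = ([x] : PySem.Set α) := by
        unfold PySem.Set.add
        rw [if_neg (by simp [PySem.Set.contains])]
        simp
      rw [this]; exact ih _
    by_cases h : PySem.Set.contains vis x = true
    · have hx : x ∈ vis := (contains_iff vis x).1 h
      have h1 : newOf vis (x :: xs) = newOf vis xs := by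
        simp only [newOf]; rw [if_pos h]
      rw [h1, ih vis, hnil, List.filter_cons_of_neg (by simp [hx]), hone, List.filter_filter]
      apply List.filter_congr
      intro a _
      by_cases hax : a = x
      · subst hax; simp [h, hx]
      · have : PySem.Set.contains ([x] : PySem.Set α) a = false := by
          rw [← Bool.not_eq_true]
          intro hc
          exact hax (by simpa using (contains_iff _ a).1 hc)
        simp [this]
        exact fun _ => hax
    · have hx : x ∉ vis := fun hm => h ((contains_iff vis x).2 hm)
      have h1 : newOf vis (x :: xs) = x :: newOf (vis.add x) xs := by
        simp only [newOf]; rw [if_neg h]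
      rw [h1, hnil, List.filter_cons_of_pos (by simp [hx]), ih (vis.add x), hone,
        List.filter_filter]
      congr 1
      apply List.filter_congr
      intro a _
      by_cases hax : a = x
      · subst hax
        have h2 : PySem.Set.contains (vis.add a) a = true :=
          (contains_iff _ a).2 ((PySem.Set.mem_add vis a a).2 (Or.inr rfl))
        simp [h2]
      · have h3 : PySem.Set.contains ([x] : PySem.Set α) a = false := by
          rw [← Bool.not_eq_true]
          intro hc
          exact hax (by simpa using (contains_iff _ a).1 hc)
        have h4 : PySem.Set.contains (vis.add x) a = PySem.Set.contains vis a := by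
          by_cases hv : a ∈ vis
          · rw [(contains_iff _ a).2 ((PySem.Set.mem_add vis x a).2 (Or.inl hv)),
              (contains_iff _ a).2 hv]
          · have hna : a ∉ vis.add x := fun hm => by
              rcases (PySem.Set.mem_add vis x a).1 hm with h5 | h5
              · exact hv h5
              · exact hax h5
            have e1 : PySem.Set.contains (vis.add x) a = false := by
              rw [← Bool.not_eq_true]
              exact fun hc => hna ((contains_iff _ _).1 hc)
            have e2 : PySem.Set.contains vis a = false := by
              rw [← Bool.not_eq_true]
              exact fun hc => hv ((contains_iff _ _).1 hc)
            rw [e1, e2]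
        simp only [h3, h4]
        by_cases h5 : a ∈ vis <;> simp [h5]

theorem newOf_of_disjoint {α : Type} [BEq α] [LawfulBEq α] (xs : List α)
    (vis : PySem.Set α) (h : ∀ x ∈ xs, x ∉ vis) :
    newOf vis xs = PySem.List.dedup xs := by
  rw [newOf_filter, dedup_eq_newOf_nil]
  apply List.filter_eq_self.2
  intro a ha
  have hmem := ((mem_newOf xs ([] : PySem.Set α)).1 ha).1
  have hfalse : PySem.Set.contains vis a = false := by
    rw [← Bool.not_eq_true]
    exact fun hc => h a hmem ((contains_iff vis a).1 hc)
  rw [Bool.not_eq_true']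
  exact hfalse

theorem newOf_nil_of_subset {α : Type} [BEq α] [LawfulBEq α] {xs : List α}
    {vis : PySem.Set α} (h : ∀ x ∈ xs, x ∈ vis) : newOf vis xs = [] := by
  rw [newOf_filter]
  apply List.filter_eq_nil_iff.2
  intro a ha hf
  have hmem := ((mem_newOf xs ([] : PySem.Set α)).1 ha).1
  rw [Bool.not_eq_true'] at hf
  rw [(contains_iff vis a).2 (h a hmem)] at hf
  simp at hf

theorem newOf_congr {α : Type} [BEq α] [LawfulBEq α] {xs ys : List α}
    (h : newOf ([] : PySem.Set α) xs = newOf ([] : PySem.Set α) ys) (vis : PySem.Set α) :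
    newOf vis xs = newOf vis ys := by
  rw [newOf_filter, h, ← newOf_filter]

theorem update_append_of_disjoint {α : Type} [BEq α] [LawfulBEq α] (l : List α) :
    ∀ (res : PySem.Set α), l.Nodup → (∀ x ∈ l, x ∉ res) →
    PySem.Set.update res l = res ++ l := by
  induction l with
  | nil => intro res _ _; simp [PySem.Set.update]
  | cons x l ih =>
    intro res hnd h
    rw [update_cons]
    have hadd : res.add x = res ++ [x] := by
      unfold PySem.Set.add
      rw [if_neg (fun hc => h x List.mem_cons_self ((contains_iff res x).1 hc))]
    rw [ih (res.add x) (List.nodup_cons.1 hnd).2 ?_, hadd]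
    · simp
    · intro a ha hm
      rcases (by rw [hadd] at hm; simpa using hm : a ∈ res ∨ a = x) with h2 | h2
      · exact h a (List.mem_cons_of_mem _ ha) h2
      · exact (List.nodup_cons.1 hnd).1 (h2 ▸ ha)

theorem newOf_flatMap_newOf {α : Type} [BEq α] [LawfulBEq α] (f : α → List α)
    (xs : List α) :
    ∀ (V seen : PySem.Set α), (∀ x ∈ V, ∀ y ∈ f x, y ∈ seen) →
    newOf seen ((newOf V xs).flatMap f) = newOf seen (xs.flatMap f) := by
  induction xs with
  | nil => intro V seen _; simp [newOf]
  | cons x xs ih =>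
    intro V seen hVs
    rw [List.flatMap_cons]
    by_cases h : PySem.Set.contains V x = true
    · have hx : x ∈ V := (contains_iff V x).1 h
      have h1 : newOf V (x :: xs) = newOf V xs := by
        simp only [newOf]; rw [if_pos h]
      rw [h1, ih V seen hVs, newOf_append,
        newOf_nil_of_subset (fun y hy => hVs x hx y hy)]
      simp
    · have h1 : newOf V (x :: xs) = x :: newOf (V.add x) xs := by
        simp only [newOf]; rw [if_neg h]
      rw [h1, List.flatMap_cons, newOf_append, newOf_append]
      congr 1
      apply ih
      intro a ha y hy
      rcases (PySem.Set.mem_add V x a).1 ha with h2 | h2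
      · exact List.mem_append_left _ (hVs a h2 y hy)
      · subst h2
        by_cases hys : y ∈ seen
        · exact List.mem_append_left _ hys
        · exact List.mem_append_right _ ((mem_newOf (f a) seen).2 ⟨hy, hys⟩)

theorem dedup_flatMap_dedup {α : Type} [BEq α] [LawfulBEq α] (f : α → List α)
    (xs : List α) :
    PySem.List.dedup ((PySem.List.dedup xs).flatMap f) = PySem.List.dedup (xs.flatMap f) := by
  rw [dedup_eq_newOf_nil xs, dedup_eq_newOf_nil, dedup_eq_newOf_nil]
  exact newOf_flatMap_newOf f xs [] [] (by simp)

theorem newOf_flatMap_cons {α : Type} [BEq α] [LawfulBEq α] (h : α → List α)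
    (X : List α) :
    ∀ (seen : PySem.Set α), (∀ u ∈ X, u ∈ seen) →
    newOf seen (X.flatMap (fun u => u :: h u)) = newOf seen (X.flatMap h) := by
  induction X with
  | nil => intro seen _; simp [newOf]
  | cons u X ih =>
    intro seen hs
    rw [List.flatMap_cons, List.flatMap_cons]
    have h1 : (u :: h u) ++ X.flatMap (fun u => u :: h u)
        = [u] ++ (h u ++ X.flatMap (fun u => u :: h u)) := by simp
    rw [h1, newOf_append, newOf_nil_of_subset (by
      intro a ha
      rw [List.mem_singleton.1 ha]
      exact hs u List.mem_cons_self), newOf_append (h u), newOf_append (h u)]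
    simp only [List.nil_append, List.append_nil]
    congr 1
    apply ih
    intro a ha
    exact List.mem_append_left _ (hs a (List.mem_cons_of_mem _ ha))

theorem dedup_decomp {α : Type} [BEq α] [LawfulBEq α] (xs ys : List α) :
    PySem.List.dedup (xs ++ ys)
      = PySem.List.dedup xs ++ newOf (PySem.List.dedup xs) ys := by
  rw [dedup_eq_newOf_nil, dedup_eq_newOf_nil, newOf_append]
  simp [dedup_eq_newOf_nil]

theorem newOf_map_cons (c : Char) (xs : List (List Char)) :
    ∀ (vis : PySem.Set (List Char)),
    newOf (vis.map (fun u => c :: u)) (xs.map (fun u => c :: u))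
      = (newOf vis xs).map (fun u => c :: u) := by
  induction xs with
  | nil => intro vis; simp [newOf]
  | cons x xs ih =>
    intro vis
    rw [List.map_cons]
    have hc : PySem.Set.contains (vis.map (fun u => c :: u)) (c :: x)
        = PySem.Set.contains vis x := by
      by_cases hv : x ∈ vis
      · rw [(contains_iff _ _).2 (List.mem_map_of_mem hv), (contains_iff _ _).2 hv]
      · have hnm : (c :: x) ∉ vis.map (fun u => c :: u) := by
          intro hm
          obtain ⟨u, hu, he⟩ := List.mem_map.1 hm
          exact hv (by injection he with _ h2; exact h2 ▸ hu)
        have e1 : PySem.Set.contains (vis.map (fun u => c :: u)) (c :: x) = false := by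
          rw [← Bool.not_eq_true]
          exact fun hcc => hnm ((contains_iff _ _).1 hcc)
        have e2 : PySem.Set.contains vis x = false := by
          rw [← Bool.not_eq_true]
          exact fun hcc => hv ((contains_iff _ _).1 hcc)
        rw [e1, e2]
    by_cases h : PySem.Set.contains vis x = true
    · have h1 : newOf vis (x :: xs) = newOf vis xs := by
        simp only [newOf]; rw [if_pos h]
      have h2 : newOf (vis.map (fun u => c :: u)) ((c :: x) :: xs.map (fun u => c :: u))
          = newOf (vis.map (fun u => c :: u)) (xs.map (fun u => c :: u)) := by
        simp only [newOf]; rw [if_pos (hc.trans h)]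
      rw [h2, h1, ih]
    · have h1 : newOf vis (x :: xs) = x :: newOf (vis.add x) xs := by
        simp only [newOf]; rw [if_neg h]
      have h2 : newOf (vis.map (fun u => c :: u)) ((c :: x) :: xs.map (fun u => c :: u))
          = (c :: x) :: newOf (PySem.Set.add (vis.map (fun u => c :: u)) (c :: x)) (xs.map (fun u => c :: u)) := by
        simp only [newOf]
        rw [if_neg (fun hx => h (hc ▸ hx))]
      have hadd : PySem.Set.add (vis.map (fun u => c :: u)) (c :: x) = (vis.add x).map (fun u => c :: u) := by
        unfold PySem.Set.add
        rw [if_neg (fun hx => h (hc ▸ hx)), if_neg h]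
        simp
      rw [h2, hadd, ih, h1, List.map_cons]

theorem dedup_map_cons (c : Char) (xs : List (List Char)) :
    PySem.List.dedup (xs.map (fun u => c :: u))
      = (PySem.List.dedup xs).map (fun u => c :: u) := by
  rw [dedup_eq_newOf_nil, dedup_eq_newOf_nil]
  have := newOf_map_cons c xs []
  simpa using this

-- delkB basics
theorem mem_delkB_length : ∀ (s : List Char), ∀ (k : Nat), ∀ {x : List Char}, x ∈ delkB s k →
    x.length + k = s.length := by
  intro s
  induction s with
  | nil =>
    intro k x h
    cases k with
    | zero => simp [delkB] at h; subst h; simp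
    | succ k => simp [delkB] at h
  | cons c t ih =>
    intro k x h
    cases k with
    | zero => simp [delkB] at h; subst h; simp
    | succ k =>
      have hstep : delkB (c :: t) (k + 1)
          = delkB t k ++ (delkB t (k + 1)).map (fun u => c :: u) := by simp [delkB]
      rw [hstep] at h
      rcases List.mem_append.1 h with h1 | h1
      · have := ih k h1
        simp only [List.length_cons]
        omega
      · obtain ⟨u, hu, rfl⟩ := List.mem_map.1 h1
        have := ih (k + 1) hu
        simp only [List.length_cons]
        omega

theorem delkB_eq_nil_of_lt : ∀ (s : List Char) (k : Nat), s.length < k → delkB s k = [] := by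
  intro s
  induction s with
  | nil =>
    intro k h
    cases k with
    | zero => simp at h
    | succ k => simp [delkB]
  | cons c t ih =>
    intro k h
    cases k with
    | zero => simp at h
    | succ k =>
      have hstep : delkB (c :: t) (k + 1)
          = delkB t k ++ (delkB t (k + 1)).map (fun u => c :: u) := by simp [delkB]
      rw [hstep, ih k (by simp at h; omega), ih (k + 1) (by simp at h; omega)]
      simp

theorem delCandidate_natCast (s : List Char) (j : Nat) :
    delCandidate s (j : Int) = s.take j ++ s.drop (j + 1) := by
  rw [delCandidate, PySem.List.slice_to_natCast]
  have h1 : ((j : Int) + 1) = ((j + 1 : Nat) : Int) := by push_cast; ring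
  rw [h1, PySem.List.slice_from_natCast]

theorem range_del_eq_delkB_one : ∀ (s : List Char),
    (List.range s.length).map (fun j => s.take j ++ s.drop (j + 1)) = delkB s 1 := by
  intro s
  induction s with
  | nil => rfl
  | cons c t ih =>
    rw [List.length_cons, List.range_succ_eq_map, List.map_cons]
    have htail : (List.map Nat.succ (List.range t.length)).map
        (fun j => (c :: t).take j ++ (c :: t).drop (j + 1))
        = ((List.range t.length).map (fun j => t.take j ++ t.drop (j + 1))).map
            (fun u => c :: u) := by
      rw [List.map_map, List.map_map]
      apply List.map_congr_left
      intro j _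
      simp [List.take_succ_cons, List.drop_succ_cons]
    rw [htail, ih]
    simp [delkB]

-- the index-loop candidates are exactly delkB s 1 in order
theorem cands_eq_delkB_one (s : List Char) :
    (PySem.List.pyRange 0 (s.length : Int) 1).map (delCandidate s) = delkB s 1 := by
  rw [PySem.List.pyRange_zero_natCast s.length, List.map_map, ← range_del_eq_delkB_one]
  apply List.map_congr_left
  intro j _
  simp only [Function.comp]
  exact delCandidate_natCast s j

-- THE CRUX: one more deletion level, deduped, is exactly-(k+1) deletions, deduped
theorem crux (s : List Char) : ∀ (k : Nat),
    PySem.List.dedup ((delkB s k).flatMap (fun u => delkB u 1))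
      = PySem.List.dedup (delkB s (k + 1)) := by
  induction s with
  | nil =>
    intro k
    cases k with
    | zero => rfl
    | succ k => rfl
  | cons c t ih =>
    intro k
    cases k with
    | zero => simp [delkB]
    | succ k =>
      have hstep : delkB (c :: t) (k + 1)
          = delkB t k ++ (delkB t (k + 1)).map (fun u => c :: u) := by simp [delkB]
      have hstep2 : delkB (c :: t) (k + 1 + 1)
          = delkB t (k + 1) ++ (delkB t (k + 1 + 1)).map (fun u => c :: u) := by simp [delkB]
      rw [hstep, hstep2, List.flatMap_append, List.flatMap_map]
      have hbody : (delkB t (k + 1)).flatMap (fun u => delkB (c :: u) 1)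
          = (delkB t (k + 1)).flatMap (fun u => u :: (delkB u 1).map (fun v => c :: v)) := by
        simp only [show ∀ u : List Char,
          delkB (c :: u) 1 = u :: (delkB u 1).map (fun v => c :: v) from fun u => by
            simp [delkB]]
      rw [hbody, dedup_decomp, dedup_decomp, ih k]
      congr 1
      rw [newOf_flatMap_cons _ _ _ (fun u hu => by
        rw [PySem.List.dedup_eq_ofList]
        exact (PySem.Set.mem_ofList _ u).2 hu)]
      have hmf : (delkB t (k + 1)).flatMap (fun u => (delkB u 1).map (fun v => c :: v))
          = ((delkB t (k + 1)).flatMap (fun u => delkB u 1)).map (fun v => c :: v) := by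
        rw [List.map_flatMap]
      rw [hmf]
      apply newOf_congr
      rw [← dedup_eq_newOf_nil, ← dedup_eq_newOf_nil, dedup_map_cons, dedup_map_cons, ih (k + 1)]

-- level-indexed families
def Flev (w : List Char) (k : Nat) : List (List Char) := PySem.List.dedup (delkB w k)

def Clev (w : List Char) (a b : Nat) : List (List Char) :=
  ((List.range' a b).map (Flev w)).flatten

theorem Clev_succ (w : List Char) (a b : Nat) :
    Clev w a (b + 1) = Flev w a ++ Clev w (a + 1) b := by
  rw [Clev, List.range'_succ]
  simp [Clev]

theorem Clev_concat (w : List Char) (b : Nat) :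
    Clev w 0 (b + 1) = Clev w 0 b ++ Flev w b := by
  rw [Clev, List.range'_concat]
  simp [Clev]

theorem mem_Clev_length {w x : List Char} {a b : Nat} (h : x ∈ Clev w a b) :
    ∃ j, a ≤ j ∧ j < a + b ∧ x.length + j = w.length := by
  obtain ⟨l, hl, hx⟩ := List.mem_flatten.1 h
  obtain ⟨j, hj, rfl⟩ := List.mem_map.1 hl
  rw [List.mem_range'_1] at hj
  refine ⟨j, hj.1, hj.2, ?_⟩
  have hx' : x ∈ delkB w j := by
    rw [Flev, PySem.List.dedup_eq_ofList] at hx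
    exact (PySem.Set.mem_ofList _ x).1 hx
  exact mem_delkB_length w j hx'

theorem update_append {α : Type} [BEq α] (vis : PySem.Set α) (xs ys : List α) :
    PySem.Set.update vis (xs ++ ys) = PySem.Set.update (PySem.Set.update vis xs) ys := by
  simp [PySem.Set.update]

theorem pyRange_one_nil {a b : Int} (h : b ≤ a) : PySem.List.pyRange a b 1 = [] := by
  simp [PySem.List.pyRange]
  omega

-- processing one whole level of the BFS queue
theorem bfsA_processLevel (max_edits : Int) (d : Int) (hd : ¬ d ≥ max_edits)
    (L : List (List Char)) :
    ∀ (q2 : List (List Char × Int)) (vis res : PySem.Set (List Char)),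
    bfsA max_edits (L.map (fun c => (c, d)) ++ q2) vis res
      = bfsA max_edits
          (q2 ++ (newOf vis (L.flatMap (fun u => delkB u 1))).map (fun c => (c, d + 1)))
          (vis.update (L.flatMap (fun u => delkB u 1)))
          (res.update (newOf vis (L.flatMap (fun u => delkB u 1)))) := by
  induction L with
  | nil =>
    intro q2 vis res
    simp [newOf, PySem.Set.update]
  | cons sl L ih =>
    intro q2 vis res
    rw [List.map_cons, List.cons_append, bfsA, if_neg hd]
    simp only [foldl_stepA, cands_eq_delkB_one]
    rw [List.append_assoc, ih (q2 ++ (newOf vis (delkB sl 1)).map (fun c => (c, d + 1)))]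
    rw [List.flatMap_cons, newOf_append, update_append, update_eq_append_newOf (delkB sl 1) vis]
    have hres : PySem.Set.update res (newOf vis (delkB sl 1)
          ++ newOf (vis ++ newOf vis (delkB sl 1)) (L.flatMap (fun u => delkB u 1)))
        = PySem.Set.update (PySem.Set.update res (newOf vis (delkB sl 1)))
            (newOf (vis ++ newOf vis (delkB sl 1)) (L.flatMap (fun u => delkB u 1))) :=
      update_append _ _ _
    rw [hres, List.map_append, ← List.append_assoc]

theorem bfsA_skipAll (max_edits : Int) (L : List (List Char × Int)) :
    ∀ (vis res : PySem.Set (List Char)), (∀ p ∈ L, p.2 ≥ max_edits) →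
    bfsA max_edits L vis res = res := by
  induction L with
  | nil => intro vis res _; rw [bfsA]
  | cons p L ih =>
    intro vis res h
    obtain ⟨sl, d⟩ := p
    rw [bfsA, if_pos (h _ List.mem_cons_self)]
    exact ih vis res (fun p hp => h p (List.mem_cons_of_mem _ hp))

-- the BFS, level by level
theorem bfsA_levels (max_edits : Int) (w : List Char) : ∀ (fuel : Nat),
    ∀ (k : Nat) (res : PySem.Set (List Char)), fuel = (max_edits - k).toNat →
    (∀ x ∈ res, x ∈ Clev w 0 (k + 1)) →
    bfsA max_edits ((Flev w k).map (fun c => (c, (k : Int)))) (Clev w 0 (k + 1)) res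
      = res ++ Clev w (k + 1) ((min max_edits (w.length : Int)).toNat - k) := by
  intro fuel
  induction fuel with
  | zero =>
    intro k res hf hres
    have hk : (k : Int) ≥ max_edits := by omega
    rw [bfsA_skipAll _ _ _ _ (by
      intro p hp
      obtain ⟨c, hc, rfl⟩ := List.mem_map.1 hp
      exact hk)]
    rw [show (min max_edits (w.length : Int)).toNat - k = 0 by omega]
    simp [Clev]
  | succ f ihf =>
    intro k res hf hres
    by_cases hk : (k : Int) ≥ max_edits
    · rw [bfsA_skipAll _ _ _ _ (by
        intro p hp
        obtain ⟨c, hc, rfl⟩ := List.mem_map.1 hp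
        exact hk)]
      rw [show (min max_edits (w.length : Int)).toNat - k = 0 by omega]
      simp [Clev]
    · have hdisj : ∀ x ∈ (Flev w k).flatMap (fun u => delkB u 1), x ∉ Clev w 0 (k + 1) := by
        intro x hx hmem
        obtain ⟨u, hu, hxu⟩ := List.mem_flatMap.1 hx
        have hu' : u ∈ delkB w k := by
          rw [Flev, PySem.List.dedup_eq_ofList] at hu
          exact (PySem.Set.mem_ofList _ u).1 hu
        have h1 := mem_delkB_length w k hu'
        have h2 := mem_delkB_length u 1 hxu
        obtain ⟨j, hj0, hjlt, hjlen⟩ := mem_Clev_length hmem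
        omega
      have hkey : newOf (Clev w 0 (k + 1)) ((Flev w k).flatMap (fun u => delkB u 1))
          = Flev w (k + 1) := by
        rw [newOf_of_disjoint _ _ hdisj,
          show Flev w k = PySem.List.dedup (delkB w k) from rfl,
          dedup_flatMap_dedup, crux w k]
        rfl
      have hvis : PySem.Set.update (Clev w 0 (k + 1)) ((Flev w k).flatMap (fun u => delkB u 1))
          = Clev w 0 (k + 1 + 1) := by
        rw [update_eq_append_newOf, hkey]
        exact (Clev_concat w (k + 1)).symm
      have hresup : res.update (newOf (Clev w 0 (k + 1)) ((Flev w k).flatMap (fun u => delkB u 1)))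
          = res ++ Flev w (k + 1) := by
        rw [hkey]
        apply update_append_of_disjoint
        · rw [show Flev w (k + 1) = PySem.List.dedup (delkB w (k + 1)) from rfl,
            PySem.List.dedup_eq_ofList]
          exact PySem.Set.nodup_ofList _
        · intro x hx hr
          have hx' : x ∈ delkB w (k + 1) := by
            rw [show Flev w (k + 1) = PySem.List.dedup (delkB w (k + 1)) from rfl,
              PySem.List.dedup_eq_ofList] at hx
            exact (PySem.Set.mem_ofList _ x).1 hx
          have h1 := mem_delkB_length w (k + 1) hx'
          obtain ⟨j, hj0, hjlt, hjlen⟩ := mem_Clev_length (hres x hr)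
          omega
      rw [← List.append_nil ((Flev w k).map (fun c => (c, (k : Int)))),
        bfsA_processLevel max_edits k hk (Flev w k) [] (Clev w 0 (k + 1)) res,
        List.nil_append, hvis, hresup, hkey]
      have hcast : ((k : Int) + 1) = ((k + 1 : Nat) : Int) := by push_cast; ring
      rw [hcast, ihf (k + 1) (res ++ Flev w (k + 1)) (by omega) ?hinv]
      case hinv =>
        intro x hx
        rw [Clev_concat]
        rcases List.mem_append.1 hx with h1 | h1
        · exact List.mem_append_left _ (hres x h1)
        · exact List.mem_append_right _ h1
      rw [List.append_assoc]
      congr 1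
      by_cases hkM : k < (min max_edits (w.length : Int)).toNat
      · rw [show (min max_edits (w.length : Int)).toNat - k
            = ((min max_edits (w.length : Int)).toNat - (k + 1)) + 1 by omega,
          Clev_succ]
      · have hn : w.length < k + 1 := by omega
        have hnil : Flev w (k + 1) = [] := by
          rw [show Flev w (k + 1) = PySem.List.dedup (delkB w (k + 1)) from rfl,
            delkB_eq_nil_of_lt w (k + 1) hn]
          rfl
        rw [show (min max_edits (w.length : Int)).toNat - k = 0 by omega,
          show (min max_edits (w.length : Int)).toNat - (k + 1) = 0 by omega, hnil]
        simp [Clev]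

-- B's fold, level by level
theorem foldB_levels (w : List Char) (M : Nat) : ∀ (b : Nat),
    ∀ (a : Nat) (res : PySem.Set (List Char)), b = M + 1 - a → 1 ≤ a →
    (∀ x ∈ res, ∃ j, 1 ≤ j ∧ j < a ∧ x.length + j = w.length) →
    (PySem.List.pyRange (a : Int) ((M : Int) + 1) 1).foldl
        (fun res k => PySem.Set.update res (delkB w k.toNat)) res
      = res ++ Clev w a (M + 1 - a) := by
  intro b
  induction b with
  | zero =>
    intro a res hb ha hres
    rw [pyRange_one_nil (by omega)]
    rw [show M + 1 - a = 0 by omega]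
    simp [Clev]
  | succ b ihb =>
    intro a res hb ha hres
    have hlt : (a : Int) < (M : Int) + 1 := by omega
    rw [PySem.List.pyRange_one_cons hlt, List.foldl_cons]
    have hstep : PySem.Set.update res (delkB w ((a : Int)).toNat) = res ++ Flev w a := by
      rw [show ((a : Int)).toNat = a by simp, update_eq_append_newOf,
        newOf_of_disjoint _ _ ?hdisj]
      case hdisj =>
        intro x hx hr
        have h1 := mem_delkB_length w a hx
        obtain ⟨j, hj1, hja, hjlen⟩ := hres x hr
        omega
      rfl
    rw [hstep]
    have hcast : ((a : Int) + 1) = ((a + 1 : Nat) : Int) := by push_cast; ring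
    rw [hcast, ihb (a + 1) (res ++ Flev w a) (by omega) (by omega) ?hinv]
    case hinv =>
      intro x hx
      rcases List.mem_append.1 hx with h1 | h1
      · obtain ⟨j, hj1, hja, hjlen⟩ := hres x h1
        exact ⟨j, hj1, by omega, hjlen⟩
      · have hx' : x ∈ delkB w a := by
          rw [show Flev w a = PySem.List.dedup (delkB w a) from rfl,
            PySem.List.dedup_eq_ofList] at h1
          exact (PySem.Set.mem_ofList _ x).1 h1
        exact ⟨a, ha, by omega, mem_delkB_length w a hx'⟩
    rw [List.append_assoc]
    congr 1
    rw [show M + 1 - a = (M + 1 - (a + 1)) + 1 by omega, Clev_succ]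

theorem main_eq (w : List Char) (max_edits : Int) :
    bfsA max_edits [(w, 0)] (PySem.Set.ofList [w]) PySem.Set.empty
      = (PySem.List.pyRange 1 (min max_edits (w.length : Int) + 1) 1).foldl
          (fun res k => PySem.Set.update res (delkB w k.toNat)) PySem.Set.empty := by
  have hF0 : Flev w 0 = [w] := by
    rw [show Flev w 0 = PySem.List.dedup (delkB w 0) from rfl,
      show delkB w 0 = [w] from by simp [delkB]]
    rfl
  have h1 : (Flev w 0).map (fun c => (c, ((0 : Nat) : Int))) = [(w, (0 : Int))] := by
    rw [hF0]
    rfl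
  have h2 : Clev w 0 (0 + 1) = PySem.Set.ofList [w] := by
    have hofl : PySem.Set.ofList [w] = Flev w 0 := by
      rw [hF0]
      rfl
    rw [hofl]
    simp [Clev]
  have hA := bfsA_levels max_edits w ((max_edits - 0).toNat) 0 [] rfl (by simp)
  rw [h1, h2] at hA
  have hM : (min max_edits (w.length : Int)).toNat - 0 = (min max_edits (w.length : Int)).toNat := by
    omega
  rw [hM] at hA
  have hB := foldB_levels w (min max_edits (w.length : Int)).toNat
    ((min max_edits (w.length : Int)).toNat + 1 - 1) 1 [] rfl (by omega) (by simp)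
  have hr : PySem.List.pyRange 1 (min max_edits (w.length : Int) + 1) 1
      = PySem.List.pyRange 1 (((min max_edits (w.length : Int)).toNat : Int) + 1) 1 := by
    by_cases hmin : 0 ≤ min max_edits (w.length : Int)
    · congr 1
      omega
    · rw [pyRange_one_nil (by omega), pyRange_one_nil (by omega)]
  have hempty : (PySem.Set.empty : PySem.Set (List Char)) = [] := rfl
  simp only [Nat.cast_one] at hB
  rw [show (min max_edits (w.length : Int)).toNat + 1 - 1
      = (min max_edits (w.length : Int)).toNat from by omega] at hB
  rw [hempty, hA, hr, hB]

-- ===== VERDICT (by name: the statement is the Claim_ definition above) =====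
theorem generate_deletion_errors_spec : Claim_equal_generate_deletion_errors := by
  intro word max_edits _
  unfold Spec_generate_deletion_errors generate_deletion_errors generate_deletion_errors_alt
  rw [main_eq]
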